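-- pv_equiv track=rewrite | github.com/Magotgarang/GROUP11-no-gcs3 | sort_search.py | sort_and_search
-- ===== SOURCE A (Python) =====
-- def sort_and_search(nums, target):
--     nums_length = len(nums)
--     # Sort the array
--     nums.sort()
--
--     # Search for the value
--     # Using binary search method
--     start = 0
--     end = len(nums) - 1
--
--     while start <= end:
--         mid = (start + end) // 2
--
--         if target > nums[mid]:
--             start = mid + 1
--
--         elif target < nums[mid]:
--             end = mid - 1
--
--         else:
--             return mid
--
--     return start
-- ===== SOURCE B (Python) =====
-- def sort_and_search(nums, target):
--     # Same in-place nums.sort() side effect as A; then divide-and-conquer on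
--     # sub-slices carrying an offset, instead of A's index-pair while loop.
--     nums.sort()
--
--     def go(seg, off):
--         if not seg:
--             return off
--         k = (len(seg) - 1) // 2
--         v = seg[k]
--         if v == target:
--             return off + k
--         if v < target:
--             return go(seg[k + 1:], off + k + 1)
--         return go(seg[:k], off)
--
--     return go(nums, 0)
-- ===== Notes on version B (the rewrite author's own statement) =====
-- stated objective: alternative
-- what changed: A's while loop over a mutable (start, end) index pair indexing the whole array is replaced by a divide-and-conquer recursion on sub-slices with an offset accumulator; the slice midpoint (len-1)//2 at offset off is exactly A's (start+end)//2, so every returned index (duplicate hits and miss insertion points included) is identical.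
import Mathlib
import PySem

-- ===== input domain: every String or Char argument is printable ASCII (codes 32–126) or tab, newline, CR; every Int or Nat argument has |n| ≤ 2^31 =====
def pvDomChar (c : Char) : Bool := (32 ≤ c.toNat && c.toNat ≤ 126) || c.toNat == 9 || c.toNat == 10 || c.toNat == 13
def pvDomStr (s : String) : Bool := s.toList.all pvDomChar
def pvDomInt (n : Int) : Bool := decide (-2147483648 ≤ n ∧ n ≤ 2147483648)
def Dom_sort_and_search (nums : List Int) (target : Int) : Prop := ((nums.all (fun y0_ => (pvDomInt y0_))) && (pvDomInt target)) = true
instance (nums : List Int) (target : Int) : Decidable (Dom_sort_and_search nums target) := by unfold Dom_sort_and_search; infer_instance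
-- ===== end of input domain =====

-- B replaces A's index-pair while-loop binary search by a divide-and-conquer recursion on
-- sub-slices with an offset; equivalence of RETURN values (both Pythons sort nums in place).

-- ===== PORT A =====
-- A's while loop over the mutable pair (start, end); returns start when the loop exits.
def sortSearchLoop (xs : List Int) (target start end_ : Int) : Int :=
  if h : start ≤ end_ then
    let mid := PySem.Int.floordiv (start + end_) 2
    let v := (PySem.List.pyGet? xs mid).getD 0   -- nums[mid]; in range on every reachable state
    if target > v then sortSearchLoop xs target (mid + 1) end_
    else if target < v then sortSearchLoop xs target start (mid - 1)
    else mid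
  else start
termination_by (end_ + 1 - start).toNat
decreasing_by
  · have := PySem.Int.floordiv_two_mid_bounds h; omega
  · have := PySem.Int.floordiv_two_mid_bounds h; omega

def sort_and_search (nums : List Int) (target : Int) : Int :=
  let sorted := PySem.List.sorted nums (fun x => x)
  sortSearchLoop sorted target 0 ((sorted.length : Int) - 1)

-- ===== PORT B =====
-- B's recursive helper go(seg, off).  seg[:k] and seg[k+1:] are ported as take/drop,
-- exact here because 0 ≤ k < len(seg).
def bsSeg (seg : List Int) (target : Int) (off : Int) : Int :=
  if hseg : seg = [] then off
  else
    let k := (seg.length - 1) / 2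
    let v := seg.getD k 0
    if v = target then off + (k : Int)
    else if v < target then bsSeg (seg.drop (k + 1)) target (off + (k : Int) + 1)
    else bsSeg (seg.take k) target off
termination_by seg.length
decreasing_by
  · have : seg.length ≠ 0 := fun h => hseg (List.length_eq_zero_iff.mp h)
    simp; omega
  · have : seg.length ≠ 0 := fun h => hseg (List.length_eq_zero_iff.mp h)
    simp; omega

def sort_and_search_alt (nums : List Int) (target : Int) : Int :=
  let s := PySem.List.sorted nums (fun x => x)
  bsSeg s target 0

-- ===== PRECONDITION & SPEC =====
def Spec_sort_and_search (nums : List Int) (target : Int) (out : Int) : Prop := out = sort_and_search_alt nums target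
instance (nums : List Int) (target : Int) (out : Int) : Decidable (Spec_sort_and_search nums target out) := by unfold Spec_sort_and_search; infer_instance

-- ===== CLAIM (what is proved, stated in full; the proofs are below) =====
def Claim_equal_sort_and_search : Prop := ∀ (nums : List Int) (target : Int), Dom_sort_and_search nums target → Spec_sort_and_search nums target (sort_and_search nums target)

-- ===== LEMMAS AND PROOFS =====

-- A's midpoint (start+end)//2 on the window [o, o+m-1] is o + (m-1)/2 (Nat division).
theorem mid_eq (o : Int) (m : Nat) (ho : 0 ≤ o) (hm : 1 ≤ m) :
    PySem.Int.floordiv (o + (o + (m : Int) - 1)) 2 = o + (((m - 1) / 2 : Nat) : Int) := by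
  rw [PySem.Int.floordiv_eq_ediv_of_pos (by omega)]
  have h1 : o + (o + (m : Int) - 1) = ((m : Int) - 1) + o * 2 := by ring
  rw [h1, Int.add_mul_ediv_right _ _ (by omega : (2:Int) ≠ 0)]
  have h2 : ((m : Int) - 1) = (((m - 1 : Nat)) : Int) := by omega
  rw [h2]
  rw [show ((2:Int)) = ((2:Nat):Int) from rfl, ← Int.natCast_div]
  omega

-- The loop on window [o, o + ys.length - 1] computes bsSeg on the segment ys at offset o,
-- whenever ys is exactly xs[o : o + ys.length].
theorem loop_eq_seg (xs : List Int) (target : Int) :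
    ∀ (n : Nat) (ys : List Int) (o : Int), ys.length = n → 0 ≤ o →
    (∀ i : Nat, i < ys.length → PySem.List.pyGet? xs (o + (i : Int)) = ys[i]?) →
    sortSearchLoop xs target o (o + (ys.length : Int) - 1) = bsSeg ys target o := by
  intro n
  induction n using Nat.strong_induction_on with
  | _ n ih =>
    intro ys o hn ho hseg
    by_cases hys : ys = []
    · subst hys
      rw [bsSeg, dif_pos rfl, sortSearchLoop,
        dif_neg (by simp only [List.length_nil]; omega)]
    · have hm : 1 ≤ ys.length := by
        cases ys with | nil => exact absurd rfl hys | cons a l => simp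
      have hkm : (ys.length - 1) / 2 < ys.length := by omega
      have hmid : PySem.Int.floordiv (o + (o + (ys.length : Int) - 1)) 2
          = o + (((ys.length - 1) / 2 : Nat) : Int) := mid_eq o ys.length ho hm
      have hgetk : ys[(ys.length - 1) / 2]? = some ys[(ys.length - 1) / 2] :=
        List.getElem?_eq_getElem hkm
      have hgd : ys.getD ((ys.length - 1) / 2) 0 = ys[(ys.length - 1) / 2] :=
        List.getD_eq_getElem ys 0 hkm
      rw [sortSearchLoop, bsSeg,
        dif_pos (by omega : o ≤ o + (ys.length : Int) - 1), dif_neg hys]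
      simp only [hmid, hseg _ hkm, hgetk, Option.getD_some, hgd]
      by_cases h1 : target > ys[(ys.length - 1) / 2]
      · rw [if_pos h1,
          if_neg (show ¬(ys[(ys.length - 1) / 2] = target) from by omega),
          if_pos (show ys[(ys.length - 1) / 2] < target from by omega)]
        -- right half: seg.drop (k+1) at offset o + k + 1
        have hlen : (ys.drop ((ys.length - 1) / 2 + 1)).length
            = ys.length - ((ys.length - 1) / 2 + 1) := by simp
        have hrec := ih (ys.length - ((ys.length - 1) / 2 + 1)) (by omega)
          (ys.drop ((ys.length - 1) / 2 + 1)) (o + (((ys.length - 1) / 2 : Nat) : Int) + 1)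
          hlen (by omega)
          (by intro i hi
              rw [hlen] at hi
              rw [List.getElem?_drop,
                show o + (((ys.length - 1) / 2 : Nat) : Int) + 1 + (i : Int)
                  = o + ((((ys.length - 1) / 2 + 1 + i : Nat)) : Int) from by push_cast; ring,
                hseg ((ys.length - 1) / 2 + 1 + i) (by omega),
                List.getElem?_eq_getElem (by omega : (ys.length - 1) / 2 + 1 + i < ys.length)])
        rw [hlen] at hrec
        rw [← hrec]
        congr 1
        push_cast
        omega
      · rw [if_neg h1]
        by_cases h2 : target < ys[(ys.length - 1) / 2]
        · rw [if_pos h2,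
            if_neg (show ¬(ys[(ys.length - 1) / 2] = target) from by omega),
            if_neg (show ¬(ys[(ys.length - 1) / 2] < target) from by omega)]
          -- left half: seg.take k at offset o
          have hlen : (ys.take ((ys.length - 1) / 2)).length = (ys.length - 1) / 2 := by
            simp; omega
          have hrec := ih ((ys.length - 1) / 2) (by omega)
            (ys.take ((ys.length - 1) / 2)) o hlen ho
            (by intro i hi
                rw [hlen] at hi
                rw [List.getElem?_take_of_lt hi, hseg i (by omega),
                  List.getElem?_eq_getElem (by omega : i < ys.length)])
          rw [hlen] at hrec
          rw [← hrec]
        · rw [if_neg h2, if_pos (show ys[(ys.length - 1) / 2] = target from by omega)]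

-- ===== VERDICT (by name: the statement is the Claim_ definition above) =====
theorem sort_and_search_spec : Claim_equal_sort_and_search := by
  intro nums target _
  unfold Spec_sort_and_search sort_and_search sort_and_search_alt
  have h := loop_eq_seg (PySem.List.sorted nums (fun x => x)) target
    (PySem.List.sorted nums (fun x => x)).length (PySem.List.sorted nums (fun x => x)) 0
    rfl (by omega) (fun i hi => by simp)
  simpa using h
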